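-- pv_equiv track=rewrite | github.com/FelipeFerraz4/Beecrowd | 1_Iniciante/beecrowd_2845_python_Festa_no_Polo_Norte.py | find_host
-- ===== SOURCE A (Python) =====
-- def find_host(n, elves):
--     elves.sort()
--     largest = elves[-1]
--
--     # Conjunto de múltiplos dos elfos (descarta o primeiro e limita a 20 elementos)
--     multiples = set()
--     for elf in elves[1:min(len(elves), 20)]:
--         start = (largest // elf + 1) * elf  # Calcula o primeiro múltiplo maior que 'largest'
--         for multiple in range(start, largest + 500, elf):
--             multiples.add(multiple)
--
--     multiples = sorted(multiples)
--
--     candidate = largest + 1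
--
--     # Encontra o menor número maior que 'largest' que não está na lista de múltiplos
--     for multiple in multiples:
--         if candidate == multiple:
--             candidate += 1
--         elif candidate < multiple:
--             break
--
--     return candidate
-- ===== SOURCE B (Python) =====
-- def find_host(n, elves):
--     # Same return value as the original; tests divisibility directly instead of
--     # precomputing, deduplicating and sorting a table of multiples.
--     # Mutates `elves` in place (sorts it), like the original.
--     elves.sort()
--     largest = elves[-1]
--     divisors = [e for e in elves[1:min(len(elves), 20)] if e > 0]
--     candidate = largest + 1
--     while candidate < largest + 500 and any(candidate % e == 0 for e in divisors):
--         candidate += 1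
--     return candidate
-- ===== Notes on version B (the rewrite author's own statement) =====
-- stated objective: simpler
-- what changed: Instead of materialising, deduplicating and sorting the set of all multiples of the considered elves in the (largest, largest+500) window and then scanning that sorted table, B walks candidates upward from largest+1 and tests divisibility directly, stopping at the first candidate divisible by no considered positive elf (or at largest+500); nonpositive elves are skipped, exactly as A's empty ranges skip them.
import Mathlib
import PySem

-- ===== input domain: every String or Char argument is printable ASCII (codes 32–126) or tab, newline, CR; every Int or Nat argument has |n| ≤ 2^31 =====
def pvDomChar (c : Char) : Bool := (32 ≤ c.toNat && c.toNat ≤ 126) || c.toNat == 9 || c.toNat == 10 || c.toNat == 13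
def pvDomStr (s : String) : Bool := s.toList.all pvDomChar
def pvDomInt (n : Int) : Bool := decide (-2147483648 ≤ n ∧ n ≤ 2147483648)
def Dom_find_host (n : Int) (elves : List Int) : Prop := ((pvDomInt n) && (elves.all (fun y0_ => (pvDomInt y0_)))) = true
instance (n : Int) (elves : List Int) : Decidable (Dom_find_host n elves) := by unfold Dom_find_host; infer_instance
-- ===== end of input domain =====

-- B replaces A's build-dedup-sort-scan multiples table by a direct upward divisibility
-- search from largest+1 (simpler); like A, the Python B sorts `elves` in place — the
-- equivalence proved here is about the return value (the mutation is identical anyway).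


-- ===== PORT A =====
-- the final `for multiple in multiples: …` loop of A (with its `break`)
def pyScanA : Int → List Int → Int
  | cand, [] => cand
  | cand, m :: rest =>
    if cand = m then pyScanA (cand + 1) rest
    else if cand < m then cand
    else pyScanA cand rest

def find_host (n : Int) (elves : List Int) : Int :=
  let s := PySem.List.sorted elves (fun x => x) false
  let largest := PySem.List.pyGetD s (-1) 0
  let multiples : PySem.Set Int :=
    (PySem.List.slice s (some 1) (some (min (s.length : Int) 20))).foldl
      (fun acc elf =>
        (PySem.List.pyRange ((PySem.Int.floordiv largest elf + 1) * elf) (largest + 500) elf).foldl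
          (fun acc m => PySem.Set.add acc m) acc)
      PySem.Set.empty
  pyScanA (largest + 1) (PySem.List.sorted multiples (fun x => x) false)

-- ===== PORT B =====
-- B's `while` loop; the Nat fuel only makes it total (500 always suffices: the guard
-- forces cand < largest+500, so the loop body runs at most 499 times)
def altLoop (largest : Int) (divisors : List Int) : Nat → Int → Int
  | 0, cand => cand
  | fuel + 1, cand =>
    if cand < largest + 500 ∧ divisors.any (fun e => PySem.Int.mod cand e == 0) then
      altLoop largest divisors fuel (cand + 1)
    else cand

def find_host_alt (n : Int) (elves : List Int) : Int :=
  let s := PySem.List.sorted elves (fun x => x) false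
  let largest := PySem.List.pyGetD s (-1) 0
  let divisors := (PySem.List.slice s (some 1) (some (min (s.length : Int) 20))).filter
    (fun e => decide (0 < e))
  altLoop largest divisors 500 (largest + 1)

-- ===== PRECONDITION & SPEC =====
-- Pre_ excludes exactly the inputs where the Python A raises: the empty list
-- (IndexError on elves[-1]) and lists whose sorted [1:20] slice contains 0
-- (ZeroDivisionError on largest // elf).
def Pre_find_host (n : Int) (elves : List Int) : Prop :=
  elves ≠ [] ∧
  (0 : Int) ∉ PySem.List.slice (PySem.List.sorted elves (fun x => x) false)
      (some 1) (some (min ((elves.length : Nat) : Int) 20))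
instance (n : Int) (elves : List Int) : Decidable (Pre_find_host n elves) := by
  unfold Pre_find_host; infer_instance

def pvWitness_find_host : Int × List Int := (0, [3, 2, 7])

def Spec_find_host (n : Int) (elves : List Int) (out : Int) : Prop := out = find_host_alt n elves
instance (n : Int) (elves : List Int) (out : Int) : Decidable (Spec_find_host n elves out) := by
  unfold Spec_find_host; infer_instance

-- ===== CLAIM (what is proved, stated in full; the proofs are below) =====
def Claim_equal_find_host : Prop := ∀ (n : Int) (elves : List Int), Dom_find_host n elves → Pre_find_host n elves → Spec_find_host n elves (find_host n elves)


-- ===== LEMMAS AND PROOFS =====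

theorem mem_foldl_set_add (ys : List Int) (s : PySem.Set Int) (x : Int) :
    x ∈ ys.foldl (fun a m => PySem.Set.add a m) s ↔ x ∈ s ∨ x ∈ ys := by
  induction ys generalizing s with
  | nil => simp
  | cons y ys ih => simp [List.foldl_cons, ih, PySem.Set.mem_add, or_assoc]

theorem nodup_foldl_set_add (ys : List Int) (s : PySem.Set Int) (hs : s.Nodup) :
    (ys.foldl (fun a m => PySem.Set.add a m) s).Nodup := by
  induction ys generalizing s with
  | nil => exact hs
  | cons y ys ih => exact ih _ (PySem.Set.nodup_add s y hs)

theorem mem_build (L : Int) (C : List Int) (acc : PySem.Set Int) (x : Int) :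
    x ∈ C.foldl (fun acc elf =>
        (PySem.List.pyRange ((PySem.Int.floordiv L elf + 1) * elf) (L + 500) elf).foldl
          (fun a m => PySem.Set.add a m) acc) acc ↔
      x ∈ acc ∨ ∃ e ∈ C, x ∈ PySem.List.pyRange ((PySem.Int.floordiv L e + 1) * e) (L + 500) e := by
  induction C generalizing acc with
  | nil => simp
  | cons c C ih => simp [List.foldl_cons, ih, mem_foldl_set_add, or_assoc]

theorem nodup_build (L : Int) (C : List Int) :
    (C.foldl (fun acc elf =>
        (PySem.List.pyRange ((PySem.Int.floordiv L elf + 1) * elf) (L + 500) elf).foldl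
          (fun a m => PySem.Set.add a m) acc) PySem.Set.empty).Nodup := by
  have h : ∀ (C : List Int) (acc : PySem.Set Int), acc.Nodup →
      (C.foldl (fun acc elf =>
        (PySem.List.pyRange ((PySem.Int.floordiv L elf + 1) * elf) (L + 500) elf).foldl
          (fun a m => PySem.Set.add a m) acc) acc).Nodup := by
    intro C
    induction C with
    | nil => intro acc h; exact h
    | cons c C ih => intro acc h; exact ih _ (nodup_foldl_set_add _ _ h)
  exact h C _ List.nodup_nil

theorem range_char (L e x : Int) (he : 0 < e) :
    x ∈ PySem.List.pyRange ((PySem.Int.floordiv L e + 1) * e) (L + 500) e ↔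
      (L < x ∧ x < L + 500 ∧ e ∣ x) := by
  rw [PySem.List.mem_pyRange_iff_of_pos he]
  have hq := PySem.Int.floordiv_mul_add_mod L e
  have hm0 : 0 ≤ PySem.Int.mod L e := PySem.Int.mod_nonneg L he
  have hm1 : PySem.Int.mod L e < e := PySem.Int.mod_lt L he
  set q := PySem.Int.floordiv L e with hqdef
  have hd : e ∣ (q + 1) * e := Dvd.intro_left _ rfl
  rw [dvd_sub_comm, dvd_sub_right hd]
  constructor
  · rintro ⟨h1, h2, k, rfl⟩
    refine ⟨?_, h2, ⟨k, rfl⟩⟩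
    nlinarith
  · rintro ⟨h1, h2, k, rfl⟩
    refine ⟨?_, h2, ⟨k, rfl⟩⟩
    have hk : q + 1 ≤ k := by nlinarith
    nlinarith

theorem range_empty (L e : Int) (he : e < 0) :
    PySem.List.pyRange ((PySem.Int.floordiv L e + 1) * e) (L + 500) e = [] := by
  have hb := PySem.Int.mod_neg_bounds L he
  have hq := PySem.Int.floordiv_mul_add_mod L e
  have hle : (PySem.Int.floordiv L e + 1) * e ≤ L := by nlinarith
  simp only [PySem.List.pyRange]
  rw [if_neg (by omega)]
  rw [if_neg (by omega), if_neg (by omega)]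
  simp

theorem scan_spec (ms : List Int) (cand : Int) (hp : ms.Pairwise (· < ·)) :
    (∀ m ∈ ms, cand ≤ m) →
    cand ≤ pyScanA cand ms ∧ pyScanA cand ms ∉ ms ∧
      ∀ c, cand ≤ c → c < pyScanA cand ms → c ∈ ms := by
  induction ms generalizing cand with
  | nil => intro _; simp [pyScanA]
  | cons m rest ih =>
    intro hall
    rcases List.pairwise_cons.mp hp with ⟨hm, hp'⟩
    by_cases hc : cand = m
    · subst hc
      have hall' : ∀ x ∈ rest, cand + 1 ≤ x := by
        intro x hx; have := hm x hx; omega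
      obtain ⟨h1, h2, h3⟩ := ih (cand + 1) hp' hall'
      rw [show pyScanA cand (cand :: rest) = pyScanA (cand + 1) rest by simp [pyScanA]]
      refine ⟨by omega, ?_, ?_⟩
      · intro hmem
        rcases List.mem_cons.mp hmem with h | h
        · omega
        · exact h2 h
      · intro c hc1 hc2
        by_cases hcc : c = cand
        · exact hcc ▸ List.mem_cons_self
        · exact List.mem_cons_of_mem _ (h3 c (by omega) hc2)
    · have hlt : cand < m := lt_of_le_of_ne (hall m List.mem_cons_self) hc
      rw [show pyScanA cand (m :: rest) = cand by simp [pyScanA, hc, hlt]]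
      refine ⟨le_refl _, ?_, by omega⟩
      intro hmem
      rcases List.mem_cons.mp hmem with h | h
      · omega
      · have := hm _ h; omega

theorem loop_spec (L : Int) (D : List Int) (fuel : Nat) (cand : Int)
    (hfuel : L + 500 ≤ cand + fuel) :
    cand ≤ altLoop L D fuel cand ∧
    ¬ (altLoop L D fuel cand < L + 500 ∧
        D.any (fun e => PySem.Int.mod (altLoop L D fuel cand) e == 0) = true) ∧
    ∀ c, cand ≤ c → c < altLoop L D fuel cand →
      (c < L + 500 ∧ D.any (fun e => PySem.Int.mod c e == 0) = true) := by
  induction fuel generalizing cand with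
  | zero =>
    simp only [altLoop]
    refine ⟨le_refl _, ?_, by omega⟩
    intro h; omega
  | succ fuel ih =>
    by_cases hg : cand < L + 500 ∧ D.any (fun e => PySem.Int.mod cand e == 0) = true
    · rw [show altLoop L D (fuel + 1) cand = altLoop L D fuel (cand + 1) by simp [altLoop, hg]]
      obtain ⟨h1, h2, h3⟩ := ih (cand + 1) (by omega)
      refine ⟨by omega, h2, ?_⟩
      intro c hc1 hc2
      by_cases hcc : c = cand
      · exact hcc ▸ hg
      · exact h3 c (by omega) hc2
    · rw [show altLoop L D (fuel + 1) cand = cand by simp only [altLoop, if_neg hg]]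
      exact ⟨le_refl _, hg, by omega⟩

theorem core (L : Int) (C : List Int) (h0 : (0 : Int) ∉ C) :
    pyScanA (L + 1)
      (PySem.List.sorted
        (C.foldl (fun acc elf =>
          (PySem.List.pyRange ((PySem.Int.floordiv L elf + 1) * elf) (L + 500) elf).foldl
            (fun acc m => PySem.Set.add acc m) acc) PySem.Set.empty)
        (fun x => x) false) =
    altLoop L (C.filter (fun e => decide (0 < e))) 500 (L + 1) := by
  set multSet := C.foldl (fun acc elf =>
      (PySem.List.pyRange ((PySem.Int.floordiv L elf + 1) * elf) (L + 500) elf).foldl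
        (fun acc m => PySem.Set.add acc m) acc) PySem.Set.empty with hmult
  set ms := PySem.List.sorted multSet (fun x => x) false with hms
  set D := C.filter (fun e => decide (0 < e)) with hD
  have hmem : ∀ x : Int, x ∈ ms ↔ (L < x ∧ x < L + 500 ∧ ∃ e ∈ C, 0 < e ∧ e ∣ x) := by
    intro x
    rw [hms, PySem.List.mem_sorted, hmult, mem_build]
    constructor
    · rintro (h | ⟨e, heC, hx⟩)
      · exact absurd h (by simp [PySem.Set.empty])
      · rcases lt_trichotomy 0 e with he | he | he
        · obtain ⟨h1, h2, h3⟩ := (range_char L e x he).mp hx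
          exact ⟨h1, h2, e, heC, he, h3⟩
        · exact absurd heC (he ▸ h0)
        · rw [range_empty L e he] at hx; exact absurd hx (List.not_mem_nil)
    · rintro ⟨h1, h2, e, heC, he, hd⟩
      exact Or.inr ⟨e, heC, (range_char L e x he).mpr ⟨h1, h2, hd⟩⟩
  have hany : ∀ c : Int, (D.any (fun e => PySem.Int.mod c e == 0) = true) ↔
      ∃ e ∈ C, 0 < e ∧ e ∣ c := by
    intro c
    rw [List.any_eq_true]
    constructor
    · rintro ⟨e, heD, hbe⟩
      rw [hD, List.mem_filter] at heD
      refine ⟨e, heD.1, by simpa using heD.2, ?_⟩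
      exact (PySem.Int.mod_eq_zero_iff_dvd c e).mp (by simpa using hbe)
    · rintro ⟨e, heC, hpos, hd⟩
      refine ⟨e, ?_, ?_⟩
      · rw [hD, List.mem_filter]; exact ⟨heC, by simpa⟩
      · simpa using (PySem.Int.mod_eq_zero_iff_dvd c e).mpr hd
  have hnd : ms.Nodup := ((PySem.List.sorted_perm multSet (fun x => x) false).nodup_iff).mpr
    (nodup_build L C)
  have hple : ms.Pairwise (· ≤ ·) := PySem.List.sorted_pairwise multSet (fun x => x)
  have hp : ms.Pairwise (· < ·) := (hple.and hnd).imp (fun h => lt_of_le_of_ne h.1 h.2)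
  have hall : ∀ m ∈ ms, L + 1 ≤ m := by
    intro m hm; have := (hmem m).mp hm; omega
  obtain ⟨a1, a2, a3⟩ := scan_spec ms (L + 1) hp hall
  obtain ⟨b1, b2, b3⟩ := loop_spec L D 500 (L + 1) (by push_cast; omega)
  set r1 := pyScanA (L + 1) ms
  set r2 := altLoop L D 500 (L + 1)
  rcases lt_trichotomy r1 r2 with h | h | h
  · exfalso
    obtain ⟨hlt, hblocked⟩ := b3 r1 a1 h
    exact a2 ((hmem r1).mpr ⟨by omega, hlt, (hany r1).mp hblocked⟩)
  · exact h
  · exfalso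
    have hr2 := a3 r2 b1 h
    obtain ⟨h1, h2, h3⟩ := (hmem r2).mp hr2
    exact b2 ⟨h2, (hany r2).mpr h3⟩

-- ===== VERDICT (by name: the statement is the Claim_ definition above) =====
theorem find_host_spec : Claim_equal_find_host := by
  intro n elves _ hpre
  obtain ⟨hne, h0⟩ := hpre
  unfold Spec_find_host
  show find_host n elves = find_host_alt n elves
  have hlen : (PySem.List.sorted elves (fun x => x) false).length = elves.length :=
    PySem.List.length_sorted elves (fun x => x) false
  rw [← hlen] at h0
  simp only [find_host, find_host_alt]
  exact core _ _ h0
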